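-- pv_equiv track=rewrite | github.com/vladudenis/aoc23 | 2 - Cube Conundrum/2.py | is_game_possible
-- ===== SOURCE A (Python) =====
-- def is_game_possible(game: str, config: [str]):
--     outcomes = game.split(",")
--
--     for c in config:
--         c_nr = int(c.split(" ")[0])
--         c_color = c.split(" ")[1]
--
--         for o in outcomes:
--             o = o.strip()
--             o_nr = int(o.split(" ")[0])
--             o_color = o.split(" ")[1]
--
--             if o_color == c_color and o_nr > c_nr:
--                 return False
--
--     return True
-- ===== SOURCE B (Python) =====
-- def _parse(token):
--     parts = token.split(" ")
--     return int(parts[0]), parts[1]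
--
--
-- def is_game_possible(game: str, config: [str]):
--     if not config:
--         return True
--     maxima = {}
--     for outcome in game.split(","):
--         nr, color = _parse(outcome.strip())
--         maxima[color] = max(nr, maxima.get(color, nr))
--     for c in config:
--         nr, color = _parse(c)
--         if color in maxima and maxima[color] > nr:
--             return False
--     return True
-- ===== Notes on version B (the rewrite author's own statement) =====
-- stated objective: alternative
-- what changed: B replaces A's nested config-by-outcomes rescan with one pass over the outcomes building a dict of per-color maxima, then a single pass over config checking each limit against the dict.
-- outside the precondition, e.g. on is_game_possible('5 red, bad', ['1 red']): A returns False, B raises ValueError; on is_game_possible('5 red, 7', ['1 red']): A returns False, B raises IndexError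
import Mathlib
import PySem

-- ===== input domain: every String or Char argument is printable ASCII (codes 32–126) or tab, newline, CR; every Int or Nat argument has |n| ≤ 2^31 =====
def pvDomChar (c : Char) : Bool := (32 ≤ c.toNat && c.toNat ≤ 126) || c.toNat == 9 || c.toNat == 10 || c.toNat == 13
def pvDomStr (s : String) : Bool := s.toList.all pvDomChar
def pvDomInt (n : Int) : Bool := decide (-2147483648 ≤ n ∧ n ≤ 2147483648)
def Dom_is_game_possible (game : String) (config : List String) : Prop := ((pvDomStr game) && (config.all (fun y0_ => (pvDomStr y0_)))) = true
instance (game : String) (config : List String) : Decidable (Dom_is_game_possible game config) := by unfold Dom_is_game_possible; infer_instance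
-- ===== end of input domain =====

-- B replaces A's nested rescan of the outcomes for every config entry by one pass building
-- a dict of per-color maxima followed by one pass over config (objective: alternative).

-- ===== PORT A =====
-- inner 'for o in outcomes' loop of A: true iff it reaches 'return False'
def pvInnerA (c_nr : Int) (c_color : String) : List String → Bool
  | [] => false
  | o :: rest =>
      let o' := PySem.Str.strip o
      let o_nr := (PySem.Int.ofStr? (((PySem.Str.split? o' " ").getD []).getD 0 "")).getD 0
      let o_color := ((PySem.Str.split? o' " ").getD []).getD 1 ""
      if o_color == c_color && decide (o_nr > c_nr) then true
      else pvInnerA c_nr c_color rest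

-- outer 'for c in config' loop of A
def pvOuterA (outcomes : List String) : List String → Bool
  | [] => true
  | c :: rest =>
      let c_nr := (PySem.Int.ofStr? (((PySem.Str.split? c " ").getD []).getD 0 "")).getD 0
      let c_color := ((PySem.Str.split? c " ").getD []).getD 1 ""
      if pvInnerA c_nr c_color outcomes then false else pvOuterA outcomes rest

def is_game_possible (game : String) (config : List String) : Bool :=
  pvOuterA ((PySem.Str.split? game ",").getD []) config

-- ===== PORT B =====
-- B's _parse helper: (int(parts[0]), parts[1])
def pvParseB (token : String) : Int × String :=
  let parts := (PySem.Str.split? token " ").getD []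
  ((PySem.Int.ofStr? (parts.getD 0 "")).getD 0, parts.getD 1 "")

-- B's first loop: dict color -> maximum count seen among the outcomes
def pvMaximaB : List String → PySem.Dict String Int → PySem.Dict String Int
  | [], maxima => maxima
  | outcome :: rest, maxima =>
      let p := pvParseB (PySem.Str.strip outcome)
      pvMaximaB rest (maxima.insert p.2 (max p.1 (maxima.getD p.2 p.1)))

-- B's second loop over config
def pvCheckB (maxima : PySem.Dict String Int) : List String → Bool
  | [] => true
  | c :: rest =>
      let p := pvParseB c
      match maxima.get? p.2 with
      | some m => if m > p.1 then false else pvCheckB maxima rest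
      | none => pvCheckB maxima rest

def is_game_possible_alt (game : String) (config : List String) : Bool :=
  if config.isEmpty then true
  else pvCheckB (pvMaximaB ((PySem.Str.split? game ",").getD []) PySem.Dict.empty) config

-- ===== PRECONDITION & SPEC =====
-- a token is well formed when its first space-field parses as an int and a second field exists
def pvTokOk (s : String) : Bool :=
  let parts := (PySem.Str.split? s " ").getD []
  (PySem.Int.ofStr? (parts.getD 0 "")).isSome && decide (2 ≤ parts.length)

-- Pre_ excludes the inputs on which A raises ValueError/IndexError on a malformed token;
-- because A short-circuits, it also excludes some inputs where A returns False before
-- reaching a later malformed token (B raises there) — see claim.json cites.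
def Pre_is_game_possible (game : String) (config : List String) : Prop :=
  config = [] ∨
    ((∀ c ∈ config, pvTokOk c = true) ∧
     (∀ o ∈ (PySem.Str.split? game ",").getD [], pvTokOk (PySem.Str.strip o) = true))
instance (game : String) (config : List String) : Decidable (Pre_is_game_possible game config) := by
  unfold Pre_is_game_possible; infer_instance

def pvWitness_is_game_possible : String × List String := ("3 red, 1 blue", ["4 red", "2 blue"])

def Spec_is_game_possible (game : String) (config : List String) (out : Bool) : Prop := out = is_game_possible_alt game config
instance (game : String) (config : List String) (out : Bool) : Decidable (Spec_is_game_possible game config out) := by unfold Spec_is_game_possible; infer_instance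

-- ===== CLAIM (what is proved, stated in full; the proofs are below) =====
def Claim_equal_is_game_possible : Prop := ∀ (game : String) (config : List String), Dom_is_game_possible game config → Pre_is_game_possible game config → Spec_is_game_possible game config (is_game_possible game config)

-- ===== LEMMAS AND PROOFS =====

-- "the dict records a value for color exceeding nr"
def pvExceeds (d : PySem.Dict String Int) (color : String) (nr : Int) : Bool :=
  match d.get? color with
  | some m => decide (nr < m)
  | none => false

theorem pvParseB_fst (s : String) :
    (pvParseB s).1 = (PySem.Int.ofStr? (((PySem.Str.split? s " ").getD []).getD 0 "")).getD 0 := rfl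

theorem pvParseB_snd (s : String) :
    (pvParseB s).2 = ((PySem.Str.split? s " ").getD []).getD 1 "" := rfl

-- effect of one B-update on pvExceeds
theorem pvExceeds_insert_max (d : PySem.Dict String Int) (nr : Int) (color col : String)
    (cn : Int) :
    pvExceeds (d.insert color (max nr (d.getD color nr))) col cn
      = ((color == col && decide (cn < nr)) || pvExceeds d col cn) := by
  by_cases hc : color = col
  · subst hc
    simp only [pvExceeds, PySem.Dict.get?_insert_self, beq_self_eq_true, Bool.true_and]
    cases hdg : d.get? color with
    | none =>
        simp only [PySem.Dict.getD_eq_get?_getD, hdg, Option.getD_none, max_self,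
          Bool.or_false]
    | some m =>
        simp only [PySem.Dict.getD_eq_get?_getD, hdg, Option.getD_some]
        cases h1 : decide (cn < nr) <;> cases h2 : decide (cn < m) <;>
          simp_all
  · have hbeq : (color == col) = false := by simpa using hc
    simp only [pvExceeds, PySem.Dict.get?_insert_of_ne d _ (Ne.symm hc), hbeq,
      Bool.false_and, Bool.false_or]

theorem pvExceeds_maxima (os : List String) (d : PySem.Dict String Int)
    (col : String) (cn : Int) :
    pvExceeds (pvMaximaB os d) col cn = (pvInnerA cn col os || pvExceeds d col cn) := by
  induction os generalizing d with
  | nil => simp only [pvMaximaB, pvInnerA, Bool.false_or]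
  | cons o rest ih =>
      rw [pvMaximaB, pvInnerA, ih, pvExceeds_insert_max, ← pvParseB_fst, ← pvParseB_snd]
      simp only [gt_iff_lt]
      cases hb : ((pvParseB (PySem.Str.strip o)).2 == col &&
          decide (cn < (pvParseB (PySem.Str.strip o)).1)) <;>
        simp

theorem pvCheckB_cons (d : PySem.Dict String Int) (c : String) (rest : List String) :
    pvCheckB d (c :: rest)
      = (if pvExceeds d (pvParseB c).2 (pvParseB c).1 then false else pvCheckB d rest) := by
  rw [pvCheckB]
  unfold pvExceeds
  cases d.get? (pvParseB c).2 <;> simp [gt_iff_lt]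

theorem pvCheck_eq_outer (os : List String) (config : List String) :
    pvCheckB (pvMaximaB os PySem.Dict.empty) config = pvOuterA os config := by
  induction config with
  | nil => rfl
  | cons c rest ih =>
      rw [pvCheckB_cons, pvOuterA, ← pvParseB_fst, ← pvParseB_snd]
      have hx : pvExceeds (pvMaximaB os PySem.Dict.empty) (pvParseB c).2 (pvParseB c).1
          = pvInnerA (pvParseB c).1 (pvParseB c).2 os := by
        rw [pvExceeds_maxima]
        simp only [pvExceeds, PySem.Dict.get?_empty, Bool.or_false]
      rw [hx]
      cases pvInnerA (pvParseB c).1 (pvParseB c).2 os <;> simp [ih]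

-- ===== VERDICT (by name: the statement is the Claim_ definition above) =====
theorem is_game_possible_spec : Claim_equal_is_game_possible := by
  intro game config _hdom _hpre
  unfold Spec_is_game_possible is_game_possible is_game_possible_alt
  cases config with
  | nil => rfl
  | cons c rest =>
      simp only [List.isEmpty_cons, Bool.false_eq_true, if_false, pvCheck_eq_outer]
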